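-- pv_equiv track=rewrite | github.com/Luca5764/exam-bank-lab | tools/parse_sfi.py | find_option_positions
-- ===== SOURCE A (Python) =====
-- def find_option_positions(text):
--     """在 text 中按順序找 (A)(B)(C)(D) 的位置"""
--     positions = {}
--     search_from = 0
--     for letter in 'ABCD':
--         pos = text.find(f'({letter})', search_from)
--         if pos == -1:
--             break
--         positions[letter] = pos
--         search_from = pos + 3
--     return positions
-- ===== SOURCE B (Python) =====
-- def find_option_positions(text):
--     """Single left-to-right scan: record each expected marker (A)(B)(C)(D) in turn."""
--     positions = {}
--     order = 'ABCD'
--     k = 0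
--     for i in range(len(text) - 2):
--         if k == 4:
--             break
--         c = order[k]
--         if text[i] == '(' and text[i + 1] == c and text[i + 2] == ')':
--             positions[c] = i
--             k += 1
--     return positions
-- ===== Notes on version B (the rewrite author's own statement) =====
-- stated objective: alternative
-- what changed: B replaces A's four sequential str.find substring searches with a single left-to-right character scan that holds a pointer into 'ABCD' and records a marker only when it matches the currently expected letter.
import Mathlib
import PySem

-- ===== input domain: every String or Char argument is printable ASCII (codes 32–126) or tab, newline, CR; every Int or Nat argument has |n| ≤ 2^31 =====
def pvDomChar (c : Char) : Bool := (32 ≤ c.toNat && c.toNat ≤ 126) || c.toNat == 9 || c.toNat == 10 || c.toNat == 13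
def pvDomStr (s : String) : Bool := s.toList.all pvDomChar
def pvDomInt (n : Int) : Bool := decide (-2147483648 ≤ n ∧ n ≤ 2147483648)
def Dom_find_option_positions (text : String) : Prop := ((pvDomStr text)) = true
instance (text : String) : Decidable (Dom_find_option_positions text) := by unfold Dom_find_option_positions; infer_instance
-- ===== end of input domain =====

-- B replaces A's four sequential str.find searches with one left-to-right character scan
-- holding an expected-letter pointer; same return value, proved equal on the whole domain.
-- The Python dict only ever receives the fresh keys 'A','B','C','D' in order, so it is
-- ported as an association list extended by append.

-- ===== PORT A =====
-- one iteration of A's `for letter in 'ABCD'` loop; state = (positions, search_from, broke)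
def pvStepA (text : String) (st : List (String × Int) × Int × Bool) (letter : Char) :
    List (String × Int) × Int × Bool :=
  if st.2.2 then st  -- after `break`: the remaining letters do nothing
  else
    let pos := PySem.Str.findFrom text (String.ofList ['(', letter, ')']) st.2.1 none
    if pos = -1 then (st.1, st.2.1, true)
    else (st.1 ++ [(String.ofList [letter], pos)], pos + 3, false)

def find_option_positions (text : String) : List (String × Int) :=
  (['A', 'B', 'C', 'D'].foldl (pvStepA text) ([], 0, false)).1

-- ===== PORT B =====
-- one iteration of B's `for i in range(len(text) - 2)` loop; state = (positions, k).
-- `text[i]` is read via getD: every visited i satisfies i + 2 < len(text), so it is exact.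
def pvStepB (s : List Char) (st : List (String × Int) × Nat) (i : Nat) :
    List (String × Int) × Nat :=
  if st.2 = 4 then st  -- `break`: the remaining indices do nothing
  else
    let c := ['A', 'B', 'C', 'D'].getD st.2 ' '
    if s.getD i ' ' = '(' ∧ s.getD (i + 1) ' ' = c ∧ s.getD (i + 2) ' ' = ')'
    then (st.1 ++ [(String.ofList [c], (i : Int))], st.2 + 1)
    else st

-- `range(len(text) - 2)`: Python's range is empty for a non-positive bound, exactly as
-- Nat subtraction makes List.range (n - 2) empty.
def find_option_positions_alt (text : String) : List (String × Int) :=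
  ((List.range (text.toList.length - 2)).foldl (pvStepB text.toList) ([], 0)).1

-- ===== PRECONDITION & SPEC =====
def Spec_find_option_positions (text : String) (out : List (String × Int)) : Prop := out = find_option_positions_alt text
instance (text : String) (out : List (String × Int)) : Decidable (Spec_find_option_positions text out) := by unfold Spec_find_option_positions; infer_instance

-- ===== CLAIM (what is proved, stated in full; the proofs are below) =====
def Claim_equal_find_option_positions : Prop := ∀ (text : String), Dom_find_option_positions text → Spec_find_option_positions text (find_option_positions text)

-- ===== LEMMAS AND PROOFS =====

-- Common abstraction of both loops: process the remaining letters, next search start j.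
def pvCont (s : List Char) : List Char → List (String × Int) → Nat → List (String × Int)
  | [], d, _ => d
  | c :: cs, d, j =>
    let p := PySem.Chars.findFrom s ['(', c, ')'] (j : Int) none
    if p = -1 then d else pvCont s cs (d ++ [(String.ofList [c], p)]) (p.toNat + 3)

-- find points at i when sub is a prefix at i and nowhere earlier
theorem pv_find_eq {s sub : List Char} {i : Nat} (h1 : sub <+: s.drop i)
    (h2 : ∀ i' < i, ¬ sub <+: s.drop i') : PySem.Chars.find s sub = (i : Int) := by
  have hin : PySem.Chars.isIn sub s = true :=
    (PySem.Chars.exists_prefix_drop_iff_isIn sub s).mp ⟨i, h1⟩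
  have hinf : sub <:+: s := (PySem.Chars.isIn_iff_infix sub s).mp hin
  have hnn : 0 ≤ PySem.Chars.find s sub := (PySem.Chars.find_nonneg_iff s sub).mpr hinf
  obtain ⟨hpre, hmin⟩ := PySem.Chars.find_spec hnn
  have : (PySem.Chars.find s sub).toNat = i := by
    rcases lt_trichotomy (PySem.Chars.find s sub).toNat i with h | h | h
    · exact absurd hpre (h2 _ h)
    · exact h
    · exact absurd h1 (hmin i h)
  omega

-- moving the search start over a position carrying no occurrence changes nothing
theorem pv_findFrom_shift {s sub : List Char} {j : Nat} (hj : j < s.length)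
    (h : ¬ sub <+: s.drop j) :
    PySem.Chars.findFrom s sub (j : Int) none = PySem.Chars.findFrom s sub ((j + 1 : Nat) : Int) none := by
  rw [PySem.Chars.findFrom_natCast s sub j (by omega),
      PySem.Chars.findFrom_natCast s sub (j + 1) (by omega)]
  have hdd : ∀ t : Nat, (s.drop (j + 1)).drop t = s.drop (j + (t + 1)) := by
    intro t; rw [List.drop_drop]; try (congr 1; omega)
  have hd0 : ∀ t : Nat, (s.drop j).drop t = s.drop (j + t) := by
    intro t; rw [List.drop_drop]
  by_cases h2 : PySem.Chars.find (s.drop (j + 1)) sub = -1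
  · have hno2 : ¬ sub <:+: s.drop (j + 1) := (PySem.Chars.find_eq_neg_one_iff _ _).mp h2
    have h1 : PySem.Chars.find (s.drop j) sub = -1 := by
      rw [PySem.Chars.find_eq_neg_one_iff]
      intro hinf
      obtain ⟨t, ht⟩ := (PySem.Chars.exists_prefix_drop_iff_isIn sub (s.drop j)).mpr
        ((PySem.Chars.isIn_iff_infix sub (s.drop j)).mpr hinf)
      rw [hd0 t] at ht
      rcases Nat.eq_zero_or_pos t with rfl | hpos
      · exact h (by simpa using ht)
      · apply hno2
        apply (PySem.Chars.isIn_iff_infix sub (s.drop (j + 1))).mp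
        apply (PySem.Chars.exists_prefix_drop_iff_isIn sub (s.drop (j + 1))).mp
        refine ⟨t - 1, ?_⟩
        rw [hdd (t - 1)]
        have he : t - 1 + 1 = t := by omega
        rw [he]; exact ht
    simp [h1, h2]
  · have hnn2 : 0 ≤ PySem.Chars.find (s.drop (j + 1)) sub := by
      have := PySem.Chars.neg_one_le_find (s.drop (j + 1)) sub
      omega
    obtain ⟨hpre2, hmin2⟩ := PySem.Chars.find_spec hnn2
    set f2 := PySem.Chars.find (s.drop (j + 1)) sub with hf2
    have h1 : PySem.Chars.find (s.drop j) sub = ((1 + f2.toNat : Nat) : Int) := by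
      apply pv_find_eq
      · rw [hd0]
        rw [hdd] at hpre2
        have he : j + (1 + f2.toNat) = j + (f2.toNat + 1) := by ring
        rw [he]; exact hpre2
      · intro i' hi'
        rcases Nat.eq_zero_or_pos i' with rfl | hpos
        · simpa using h
        · rw [hd0]
          have he : j + i' = j + (i' - 1 + 1) := by omega
          rw [he, ← hdd]
          exact hmin2 (i' - 1) (by omega)
    have hne : ((1 + f2.toNat : Nat) : Int) ≠ -1 := by omega
    rw [h1, if_neg hne, if_neg h2]
    push_cast
    omega

-- a three-character prefix at j reads off the three characters (and forces j+2 < length)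
theorem pv_prefix3 {s : List Char} {j : Nat} {a b c : Char}
    (h : [a, b, c] <+: s.drop j) :
    s[j]?.getD ' ' = a ∧ s[j + 1]?.getD ' ' = b ∧ s[j + 2]?.getD ' ' = c ∧ j + 2 < s.length := by
  obtain ⟨t, ht⟩ := h
  have hlen : j + 3 ≤ s.length := by
    have := congrArg List.length ht
    simp [List.length_drop] at this
    omega
  have h0 : s[j]? = some a := by
    have : (s.drop j)[0]? = some a := by rw [← ht]; rfl
    simpa [List.getElem?_drop] using this
  have h1 : s[j + 1]? = some b := by
    have : (s.drop j)[1]? = some b := by rw [← ht]; rfl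
    simpa [List.getElem?_drop] using this
  have h2 : s[j + 2]? = some c := by
    have : (s.drop j)[2]? = some c := by rw [← ht]; rfl
    simpa [List.getElem?_drop] using this
  refine ⟨?_, ?_, ?_, by omega⟩ <;> simp [h0, h1, h2]

theorem pv_prefix3_of {s : List Char} {j : Nat} {a b c : Char} (hlen : j + 2 < s.length)
    (h0 : s[j]?.getD ' ' = a) (h1 : s[j + 1]?.getD ' ' = b) (h2 : s[j + 2]?.getD ' ' = c) :
    [a, b, c] <+: s.drop j := by
  have e : s.drop j = s[j] :: s[j + 1] :: s[j + 2] :: s.drop (j + 3) := by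
    rw [List.drop_eq_getElem_cons (show j < s.length by omega),
        List.drop_eq_getElem_cons (show j + 1 < s.length by omega),
        List.drop_eq_getElem_cons (show j + 2 < s.length by omega)]
  have g0 : s[j] = a := by
    rw [← h0]; simp [List.getElem?_eq_getElem (show j < s.length by omega)]
  have g1 : s[j + 1] = b := by
    rw [← h1]; simp [List.getElem?_eq_getElem (show j + 1 < s.length by omega)]
  have g2 : s[j + 2] = c := by
    rw [← h2]; simp [List.getElem?_eq_getElem (show j + 2 < s.length by omega)]
  exact ⟨s.drop (j + 3), by rw [e, g0, g1, g2]; rfl⟩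

-- past length-2 no 3-character marker fits, so the continuation returns the dict as is
theorem pv_cont_stop (s : List Char) (cs : List Char) (d : List (String × Int)) (j : Nat)
    (hj : j ≤ s.length) (hstop : s.length ≤ j + 2) : pvCont s cs d j = d := by
  cases cs with
  | nil => rfl
  | cons c cs' =>
    have hm1 : PySem.Chars.findFrom s ['(', c, ')'] (j : Int) none = -1 := by
      rw [PySem.Chars.findFrom_natCast_eq_neg_one_iff s _ j hj]
      intro hinf
      have := hinf.length_le
      simp [List.length_drop] at this
      omega
    simp [pvCont, hm1]

-- shifting the start over a position with no occurrence of the NEXT marker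
theorem pv_cont_shift (s : List Char) (cs : List Char) (d : List (String × Int)) (j : Nat)
    (hj : j < s.length)
    (h : ∀ c, cs.head? = some c → ¬ (['(', c, ')'] <+: s.drop j)) :
    pvCont s cs d j = pvCont s cs d (j + 1) := by
  cases cs with
  | nil => rfl
  | cons c cs' =>
    have hsh := pv_findFrom_shift hj (h c rfl)
    simp only [pvCont]
    rw [hsh]

-- a marker found at j is recorded and the search resumes at j + 3
theorem pv_cont_found (s : List Char) (cs : List Char) (d : List (String × Int)) (j : Nat)
    (c : Char) (hj : j ≤ s.length) (hpre : ['(', c, ')'] <+: s.drop j) :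
    pvCont s (c :: cs) d j = pvCont s cs (d ++ [(String.ofList [c], (j : Int))]) (j + 3) := by
  have hfind0 : PySem.Chars.find (s.drop j) ['(', c, ')'] = ((0 : Nat) : Int) :=
    pv_find_eq (by simpa using hpre) (fun i' hi' => absurd hi' (by omega))
  have hp : PySem.Chars.findFrom s ['(', c, ')'] ((j : Nat) : Int) none = (j : Int) := by
    rw [PySem.Chars.findFrom_natCast s _ j hj, hfind0]
    simp
  simp only [pvCont, hp]
  rw [if_neg (by omega : (j : Int) ≠ -1)]
  simp

-- A's loop after `break` leaves the dict unchanged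
theorem pv_stuckA (text : String) (cs : List Char) (d : List (String × Int)) (x : Int) :
    (cs.foldl (pvStepA text) (d, x, true)).1 = d := by
  induction cs with
  | nil => rfl
  | cons c cs ih => simpa [pvStepA] using ih

-- A's loop IS the continuation
theorem pv_foldA (text : String) (cs : List Char) (d : List (String × Int)) (j : Nat)
    (hj : j ≤ text.toList.length) :
    (cs.foldl (pvStepA text) (d, (j : Int), false)).1 = pvCont text.toList cs d j := by
  induction cs generalizing d j with
  | nil => rfl
  | cons c cs ih =>
    by_cases hm : PySem.Chars.findFrom text.toList ['(', c, ')'] (j : Int) none = -1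
    · have hstep : pvStepA text (d, (j : Int), false) c = (d, (j : Int), true) := by
        simp [pvStepA, hm]
      rw [List.foldl_cons, hstep, pv_stuckA]
      simp [pvCont, hm]
    · obtain ⟨hle, hpre, _⟩ := PySem.Chars.findFrom_natCast_spec text.toList ['(', c, ')'] j hj hm
      set p := PySem.Chars.findFrom text.toList ['(', c, ')'] (j : Int) none with hp
      have hpn : 0 ≤ p := le_trans (by positivity) hle
      have hplen : p.toNat + 3 ≤ text.toList.length := by
        have h3 := hpre.length_le
        have hLL : text.toList.length = text.length := by simp
        simp [List.length_drop] at h3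
        omega
      have hstep : pvStepA text (d, (j : Int), false) c
          = (d ++ [(String.ofList [c], p)], p + 3, false) := by
        simp [pvStepA, ← hp, hm]
      have hcast : p + 3 = ((p.toNat + 3 : Nat) : Int) := by push_cast; omega
      rw [List.foldl_cons, hstep, hcast, ih _ _ hplen]
      conv_rhs => rw [pvCont]
      rw [← hp, if_neg hm]

-- B's loop after k reaches 4 changes nothing
theorem pv_stuckB (s : List Char) (L : List Nat) (d : List (String × Int)) :
    L.foldl (pvStepB s) (d, 4) = (d, 4) := by
  induction L with
  | nil => rfl
  | cons i L ih => simpa [pvStepB] using ih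

-- B's scan over the remaining indices IS the continuation on the remaining letters
theorem pv_foldB (s : List Char) (m : Nat) :
    ∀ (j : Nat) (d : List (String × Int)) (k : Nat), j + m = s.length - 2 → k ≤ 4 →
    ((List.range' j m).foldl (pvStepB s) (d, k)).1 = pvCont s (['A', 'B', 'C', 'D'].drop k) d j := by
  induction m with
  | zero =>
    intro j d k hm hk
    rw [List.range'_zero]
    exact (pv_cont_stop s _ d j (by omega) (by omega)).symm
  | succ m ih =>
    intro j d k hm hk
    rw [List.range'_succ, List.foldl_cons]
    by_cases hk4 : k = 4
    · subst hk4
      have hstep : pvStepB s (d, 4) j = (d, 4) := by simp [pvStepB]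
      rw [hstep, pv_stuckB]
      rfl
    · have hklt : k < 4 := by omega
      have hj2 : j + 2 < s.length := by omega
      set c := (['A', 'B', 'C', 'D'] : List Char).getD k ' ' with hcdef
      have hdropk : (['A', 'B', 'C', 'D'] : List Char).drop k
          = c :: (['A', 'B', 'C', 'D'] : List Char).drop (k + 1) := by
        rw [List.drop_eq_getElem_cons (by simpa using hklt)]
        congr 1
        rw [hcdef, List.getD_eq_getElem?_getD,
            List.getElem?_eq_getElem (by simpa using hklt)]
        rfl
      have hcne : c ≠ '(' ∧ c ≠ ')' := by
        rw [hcdef]; interval_cases k <;> decide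
      have hc' : (['A', 'B', 'C', 'D'] : List Char)[k]?.getD ' ' = c := by
        rw [hcdef]; simp [List.getD_eq_getElem?_getD]
      by_cases hg : s[j]?.getD ' ' = '(' ∧ s[j + 1]?.getD ' ' = c ∧ s[j + 2]?.getD ' ' = ')'
      · have hstep : pvStepB s (d, k) j = (d ++ [(String.ofList [c], (j : Int))], k + 1) := by
          simp [pvStepB, hk4, hc', hg]
        rw [hstep, ih (j + 1) _ (k + 1) (by omega) (by omega)]
        have hpre : ['(', c, ')'] <+: s.drop j := pv_prefix3_of hj2 hg.1 hg.2.1 hg.2.2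
        have hsh1 : pvCont s ((['A', 'B', 'C', 'D'] : List Char).drop (k + 1))
            (d ++ [(String.ofList [c], (j : Int))]) (j + 1)
            = pvCont s ((['A', 'B', 'C', 'D'] : List Char).drop (k + 1))
            (d ++ [(String.ofList [c], (j : Int))]) (j + 1 + 1) := by
          apply pv_cont_shift s _ _ _ (by omega)
          intro c' _ hpre'
          obtain ⟨e0, _, _, _⟩ := pv_prefix3 hpre'
          exact hcne.1 (hg.2.1.symm.trans e0)
        have hsh2 : pvCont s ((['A', 'B', 'C', 'D'] : List Char).drop (k + 1))
            (d ++ [(String.ofList [c], (j : Int))]) (j + 1 + 1)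
            = pvCont s ((['A', 'B', 'C', 'D'] : List Char).drop (k + 1))
            (d ++ [(String.ofList [c], (j : Int))]) (j + 1 + 1 + 1) := by
          apply pv_cont_shift s _ _ _ (by omega)
          intro c' _ hpre'
          obtain ⟨e0, _, _, _⟩ := pv_prefix3 hpre'
          exact absurd (hg.2.2.symm.trans e0) (by decide)
        rw [hsh1, hsh2, hdropk, pv_cont_found s _ d j c (by omega) hpre]
      · have hstep : pvStepB s (d, k) j = (d, k) := by
          simp [pvStepB, hk4, hc']
          tauto
        rw [hstep, ih (j + 1) d k (by omega) hk]
        refine (pv_cont_shift s _ d j (by omega) ?_).symm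
        intro c' hhd hpre'
        rw [hdropk] at hhd
        simp at hhd
        subst hhd
        obtain ⟨e0, e1, e2, _⟩ := pv_prefix3 hpre'
        exact hg ⟨e0, e1, e2⟩

-- ===== VERDICT (by name: the statement is the Claim_ definition above) =====
theorem find_option_positions_spec : Claim_equal_find_option_positions := by
  intro text _
  unfold Spec_find_option_positions find_option_positions find_option_positions_alt
  rw [List.range_eq_range',
      pv_foldB text.toList (text.toList.length - 2) 0 [] 0 (by omega) (by omega)]
  have h0 : (0 : Int) = ((0 : Nat) : Int) := rfl
  rw [h0, pv_foldA text _ [] 0 (by omega)]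
  simp
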